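-- pv_equiv track=rewrite | github.com/c-yilmazer/Code_Wars_Scripts | word_a10n.py | abbrv
-- ===== SOURCE A (Python) =====
-- def abbrv(s):  #s for string
--     strings = []
--     current_string = ""
--
--     for ch in s:
--         if ch.isalpha(): #keep letters
--             current_string += ch
--         else:
--             if current_string:
--                 strings.append(current_string)
--                 current_string = "" #reset for next word
--                 strings.append(ch)
--     if current_string:
--         strings.append(current_string)
--
--     # now it should return all words separated inside a list
--     #i.e ["elephant","-", "rides","", "are","", "really","","fun","!"]
--     new_strings = []
--     for word in strings:
--         if len(word)>=4 and word.isalpha(): #turn into abbr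
--             new_word = word[0] + str(len(word)-2) + word[-1] #take the first and last character of a word, then turn the length of remaining
--             #into a string and add to the middle of the new word
--             new_strings.append(new_word)
--         elif word == "." or word == ";" or word == "," or word == ":": #separators get space after
--             new_strings.append(word +" ")
--
--         else:
--             new_strings.append(word)
--     return "".join(new_strings)
-- ===== SOURCE B (Python) =====
-- def abbrv(s):
--     out = []
--     i, n = 0, len(s)
--     while i < n:
--         if s[i].isalpha():
--             j = i + 1
--             while j < n and s[j].isalpha():
--                 j += 1
--             w = s[i:j]
--             out.append(w[0] + str(len(w) - 2) + w[-1] if j - i >= 4 else w)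
--             if j < n:  # the separator right after a word is kept
--                 out.append(s[j] + ' ' if s[j] in '.;,:' else s[j])
--                 j += 1
--             i = j
--         else:
--             i += 1  # separators not preceded by a word are dropped
--     return ''.join(out)
-- ===== Notes on version B (the rewrite author's own statement) =====
-- stated objective: alternative
-- what changed: Replaced A's two passes (a state-machine loop building an intermediate token list, then a second loop transforming each token) by a single run-based scan that finds each alpha run with an inner span, emits it transformed, and emits the one separator character that follows it, with no intermediate token list.
import Mathlib
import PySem

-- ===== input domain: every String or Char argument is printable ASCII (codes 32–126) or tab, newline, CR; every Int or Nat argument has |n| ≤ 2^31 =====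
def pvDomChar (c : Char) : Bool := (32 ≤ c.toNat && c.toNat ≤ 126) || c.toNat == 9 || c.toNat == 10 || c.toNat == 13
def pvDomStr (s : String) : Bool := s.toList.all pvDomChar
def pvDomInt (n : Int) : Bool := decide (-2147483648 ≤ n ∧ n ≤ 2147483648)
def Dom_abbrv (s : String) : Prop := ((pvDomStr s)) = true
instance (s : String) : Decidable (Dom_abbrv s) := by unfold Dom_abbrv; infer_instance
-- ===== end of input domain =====

-- B replaces A's two passes (tokenize into a list, then transform each token) by a single run-based
-- scan over alpha runs; objective: alternative decomposition (no intermediate token list).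

-- ===== PORT A =====
-- transform of A's second loop: abbreviate long alpha words, separators '.;,:' get a trailing space
def abbrvTr (w : List Char) : List Char :=
  if w.length ≥ 4 && PySem.Chars.strIsalpha w then
    w.headI :: (PySem.Int.toChars ((w.length : Int) - 2) ++ [w.getLastI])
  else if w = ['.'] || w = [';'] || w = [','] || w = [':'] then w ++ [' ']
  else w

-- A's first loop: tokenize into words and the separators that follow a word
def abbrvStep (st : List (List Char) × List Char) (ch : Char) : List (List Char) × List Char :=
  if PySem.Chars.isalpha ch then (st.1, st.2 ++ [ch])
  else if st.2 ≠ [] then (st.1 ++ [st.2, [ch]], []) else st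

def abbrv (s : String) : String :=
  let st := s.toList.foldl abbrvStep ([], [])
  let strings := if st.2 ≠ [] then st.1 ++ [st.2] else st.1
  String.mk (strings.map abbrvTr).flatten

-- ===== PORT B =====
def abbrvAltWord (w : List Char) : List Char :=
  if w.length ≥ 4 then w.headI :: (PySem.Int.toChars ((w.length : Int) - 2) ++ [w.getLastI])
  else w

def abbrvAltSep (c : Char) : List Char :=
  if c = '.' || c = ';' || c = ',' || c = ':' then [c, ' '] else [c]

mutual
-- scan: a char not starting an alpha run is dropped; an alpha run is emitted transformed,
-- then the single char right after it (if any) is emitted as separator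
def abbrvAltGo : List Char → List Char
  | [] => []
  | c :: rest =>
    if PySem.Chars.isalpha c then
      abbrvAltWord (c :: rest.takeWhile PySem.Chars.isalpha) ++
        abbrvAltAfter (rest.dropWhile PySem.Chars.isalpha)
    else abbrvAltGo rest
termination_by l => l.length
decreasing_by
  all_goals simp
  have := List.length_dropWhile_le (p := PySem.Chars.isalpha) (l := rest)
  omega

def abbrvAltAfter : List Char → List Char
  | [] => []
  | d :: r => abbrvAltSep d ++ abbrvAltGo r
termination_by l => l.length
decreasing_by simp
end

def abbrv_alt (s : String) : String := String.mk (abbrvAltGo s.toList)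

-- ===== PRECONDITION & SPEC =====
def Spec_abbrv (s : String) (out : String) : Prop := out = abbrv_alt s
instance (s : String) (out : String) : Decidable (Spec_abbrv s out) := by unfold Spec_abbrv; infer_instance

-- ===== CLAIM (what is proved, stated in full; the proofs are below) =====
def Claim_equal_abbrv : Prop := ∀ (s : String), Dom_abbrv s → Spec_abbrv s (abbrv s)

-- ===== LEMMAS AND PROOFS =====

-- the token list A's first loop produces, as a recursion on the remaining input and current word
def aTokens : List Char → List Char → List (List Char)
  | [], cur => if cur ≠ [] then [cur] else []
  | c :: t, cur =>
    if PySem.Chars.isalpha c then aTokens t (cur ++ [c])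
    else if cur ≠ [] then [cur, [c]] ++ aTokens t [] else aTokens t cur

def aAfter : List Char → List (List Char)
  | [] => []
  | d :: r => [d] :: aTokens r []

lemma abbrv_fold_eq (l : List Char) : ∀ (acc : List (List Char)) (cur : List Char),
    (let st := l.foldl abbrvStep (acc, cur)
     if st.2 ≠ [] then st.1 ++ [st.2] else st.1) = acc ++ aTokens l cur := by
  induction l with
  | nil => intro acc cur; by_cases h : cur = [] <;> simp [aTokens, h]
  | cons c t ih =>
    intro acc cur
    by_cases hc : PySem.Chars.isalpha c = true
    · simpa [abbrvStep, hc, aTokens] using ih acc (cur ++ [c])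
    · by_cases hcur : cur = []
      · simpa [abbrvStep, hc, hcur, aTokens] using ih acc []
      · simpa [abbrvStep, hc, hcur, aTokens] using ih (acc ++ [cur, [c]]) []

lemma aTokens_word (l : List Char) : ∀ (cur : List Char), cur ≠ [] →
    aTokens l cur =
      (cur ++ l.takeWhile PySem.Chars.isalpha) :: aAfter (l.dropWhile PySem.Chars.isalpha) := by
  induction l with
  | nil => intro cur h; simp [aTokens, aAfter, h]
  | cons c t ih =>
    intro cur h
    by_cases hc : PySem.Chars.isalpha c = true
    · rw [show aTokens (c :: t) cur = aTokens t (cur ++ [c]) from by simp [aTokens, hc]]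
      rw [ih (cur ++ [c]) (by simp)]
      simp [hc]
    · simp [aTokens, aAfter, hc, h]

lemma abbrvTr_single (d : Char) : abbrvTr [d] = abbrvAltSep d := by
  simp [abbrvTr, abbrvAltSep]

lemma abbrvTr_word (w : List Char) (hne : w ≠ []) (hal : ∀ x ∈ w, PySem.Chars.isalpha x = true) :
    abbrvTr w = abbrvAltWord w := by
  have : PySem.Chars.strIsalpha w = true := by
    simp [PySem.Chars.strIsalpha, hne, List.all_eq_true]
    exact fun x hx => hal x hx
  by_cases h4 : w.length ≥ 4
  · simp [abbrvTr, abbrvAltWord, h4, this]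
  · have h1 : ¬ (w = ['.'] ∨ w = [';'] ∨ w = [','] ∨ w = [':']) := by
      rintro (rfl | rfl | rfl | rfl) <;>
        exact absurd (hal _ (List.mem_singleton_self _)) (by decide)
    simp [abbrvTr, abbrvAltWord, h4]
    tauto

theorem go_eq (l : List Char) : ((aTokens l []).map abbrvTr).flatten = abbrvAltGo l := by
  match l with
  | [] => rw [abbrvAltGo]; simp [aTokens]
  | c :: t =>
    by_cases hc : PySem.Chars.isalpha c = true
    · rw [show aTokens (c :: t) [] = aTokens t [c] from by simp [aTokens, hc]]
      rw [aTokens_word t [c] (by simp)]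
      have hword : abbrvTr (c :: t.takeWhile PySem.Chars.isalpha)
          = abbrvAltWord (c :: t.takeWhile PySem.Chars.isalpha) := by
        apply abbrvTr_word _ (by simp)
        intro x hx
        rcases List.mem_cons.mp hx with rfl | hx'
        · exact hc
        · exact List.mem_takeWhile_imp hx'
      cases hdrop : t.dropWhile PySem.Chars.isalpha with
      | nil =>
        conv_rhs => rw [abbrvAltGo]
        rw [hdrop, abbrvAltAfter]
        simp [aAfter, hc, hword]
      | cons d r =>
        have hlt : r.length < t.length := by
          have := List.length_dropWhile_le (p := PySem.Chars.isalpha) (l := t)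
          rw [hdrop] at this; simp at this; omega
        have ih := go_eq r
        conv_rhs => rw [abbrvAltGo]
        rw [hdrop, abbrvAltAfter]
        simp [aAfter, hc, hword, abbrvTr_single, ih]
    · have ih := go_eq t
      conv_rhs => rw [abbrvAltGo]
      simp [aTokens, hc, ih]
termination_by l.length
decreasing_by
  · simp; omega
  · simp

-- ===== VERDICT (by name: the statement is the Claim_ definition above) =====
theorem abbrv_spec : Claim_equal_abbrv := by
  intro s _
  unfold Spec_abbrv abbrv abbrv_alt
  have h := abbrv_fold_eq s.toList [] []
  simp only at h ⊢
  rw [h]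
  simp [go_eq]
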